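-- pv_equiv track=rewrite | github.com/nipunsadvilkar/pySBD | pysbd/processor.py | sentences_with_char_spans
-- ===== SOURCE A (Python) =====
-- def sentences_with_char_spans(sents_w_spans, postp_sents):
--     new_sents_spans = []
--     tmp_offset = 0
--     for sent_w_span, postp_sent in zip(sents_w_spans, postp_sents):
--         sent, start, end = sent_w_span
--         post_len = len(postp_sent) if postp_sent else len(sent)
--         if start == 0:
--             new_sents_spans.append((postp_sent, 0, post_len))
--         else:
--             new_sents_spans.append((postp_sent, tmp_offset, tmp_offset + post_len))
--         tmp_offset = tmp_offset + post_len
--     return new_sents_spans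
-- ===== SOURCE B (Python) =====
-- def sentences_with_char_spans(sents_w_spans, postp_sents):
--     pairs = list(zip(sents_w_spans, postp_sents))
--     post_lens = [len(pp) if pp else len(sw[0]) for sw, pp in pairs]
--     offsets = [0]
--     for pl in post_lens:
--         offsets.append(offsets[-1] + pl)
--     return [(pp, 0, pl) if sw[1] == 0 else (pp, off, off + pl)
--             for (sw, pp), pl, off in zip(pairs, post_lens, offsets)]
-- ===== Notes on version B (the rewrite author's own statement) =====
-- stated objective: alternative
-- what changed: B separates the computation into stages: a post-length table, a prefix-sum offset table built once, and a final zip pass that emits the spans, instead of threading a running tmp_offset through one loop.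
import Mathlib
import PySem

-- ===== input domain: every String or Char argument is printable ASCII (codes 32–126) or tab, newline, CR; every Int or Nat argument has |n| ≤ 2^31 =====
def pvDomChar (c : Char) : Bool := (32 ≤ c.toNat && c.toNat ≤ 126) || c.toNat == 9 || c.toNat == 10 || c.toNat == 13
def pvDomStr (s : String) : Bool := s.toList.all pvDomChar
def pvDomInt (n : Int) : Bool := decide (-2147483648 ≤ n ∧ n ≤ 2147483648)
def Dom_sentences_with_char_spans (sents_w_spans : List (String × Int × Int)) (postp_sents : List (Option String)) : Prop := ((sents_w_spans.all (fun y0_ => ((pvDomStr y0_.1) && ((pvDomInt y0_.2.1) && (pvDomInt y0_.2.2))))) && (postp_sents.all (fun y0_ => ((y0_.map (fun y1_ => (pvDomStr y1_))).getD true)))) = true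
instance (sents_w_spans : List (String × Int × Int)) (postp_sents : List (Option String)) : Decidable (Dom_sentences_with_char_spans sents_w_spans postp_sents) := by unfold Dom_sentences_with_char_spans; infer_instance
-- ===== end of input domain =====

-- B replaces A's single loop threading tmp_offset with separate tables (post-lengths, prefix-sum offsets) and a final zip pass; objective: alternative decomposition.


-- ===== PORT A =====
-- A's loop over zip(sents_w_spans, postp_sents) with accumulator tmp_offset, appending in order.
def pvLoopA : List ((String × Int × Int) × Option String) → Int → List (Option String × Int × Int)
  | [], _ => []
  | (sw, pp) :: rest, tmp_offset =>
      -- post_len = len(postp_sent) if postp_sent else len(sent)  (None and "" are falsy)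
      let post_len : Int :=
        match pp with
        | some s => if PySem.Str.len s ≠ 0 then PySem.Str.len s else PySem.Str.len sw.1
        | none => PySem.Str.len sw.1
      (if sw.2.1 = 0 then (pp, 0, post_len) else (pp, tmp_offset, tmp_offset + post_len))
        :: pvLoopA rest (tmp_offset + post_len)

def sentences_with_char_spans (sents_w_spans : List (String × Int × Int)) (postp_sents : List (Option String)) : List (Option String × Int × Int) :=
  pvLoopA (sents_w_spans.zip postp_sents) 0

-- ===== PORT B =====
-- B: post-length table, prefix-sum offset table, then one zip pass emitting the spans.
def pvPostLen (sw : String × Int × Int) (pp : Option String) : Int :=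
  match pp with
  | some s => if PySem.Str.len s ≠ 0 then PySem.Str.len s else PySem.Str.len sw.1
  | none => PySem.Str.len sw.1

def sentences_with_char_spans_alt (sents_w_spans : List (String × Int × Int)) (postp_sents : List (Option String)) : List (Option String × Int × Int) :=
  let pairs := sents_w_spans.zip postp_sents
  let post_lens := pairs.map (fun p => pvPostLen p.1 p.2)
  let offsets := post_lens.scanl (· + ·) 0
  (pairs.zip (post_lens.zip offsets)).map
    (fun q => if q.1.1.2.1 = 0 then (q.1.2, 0, q.2.1) else (q.1.2, q.2.2, q.2.2 + q.2.1))

-- ===== PRECONDITION & SPEC =====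
def Spec_sentences_with_char_spans (sents_w_spans : List (String × Int × Int)) (postp_sents : List (Option String)) (out : List (Option String × Int × Int)) : Prop := out = sentences_with_char_spans_alt sents_w_spans postp_sents
instance (sents_w_spans : List (String × Int × Int)) (postp_sents : List (Option String)) (out : List (Option String × Int × Int)) : Decidable (Spec_sentences_with_char_spans sents_w_spans postp_sents out) := by unfold Spec_sentences_with_char_spans; infer_instance

-- ===== CLAIM (what is proved, stated in full; the proofs are below) =====
def Claim_equal_sentences_with_char_spans : Prop := ∀ (sents_w_spans : List (String × Int × Int)) (postp_sents : List (Option String)), Dom_sentences_with_char_spans sents_w_spans postp_sents → Spec_sentences_with_char_spans sents_w_spans postp_sents (sentences_with_char_spans sents_w_spans postp_sents)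

-- ===== LEMMAS AND PROOFS =====
lemma pvLoopB_eq (ps : List ((String × Int × Int) × Option String)) :
    ∀ (off : Int),
      ((ps.zip ((ps.map (fun p => pvPostLen p.1 p.2)).zip
          ((ps.map (fun p => pvPostLen p.1 p.2)).scanl (· + ·) off))).map
        (fun q => if q.1.1.2.1 = 0 then (q.1.2, 0, q.2.1) else (q.1.2, q.2.2, q.2.2 + q.2.1)))
      = pvLoopA ps off := by
  induction ps with
  | nil => intro off; rfl
  | cons hd tl ih =>
      intro off
      obtain ⟨sw, pp⟩ := hd
      simp only [List.map_cons, List.scanl_cons, List.zip_cons_cons, pvLoopA, ih]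
      rfl

-- ===== VERDICT (by name: the statement is the Claim_ definition above) =====
theorem sentences_with_char_spans_spec : Claim_equal_sentences_with_char_spans := by
  intro sws pps _
  unfold Spec_sentences_with_char_spans sentences_with_char_spans sentences_with_char_spans_alt
  exact (pvLoopB_eq (sws.zip pps) 0).symm
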